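-- pv_equiv track=rewrite | github.com/chritzadz/coding_problems | kembalian.py | kembalian
-- ===== SOURCE A (Python) =====
-- def base7(price):
--     list = []
--     while price > 0:
--         list.append(price%7)
--         price = price // 7
--     return list
--
-- def kurang(price):
--     base_list = base7(price)
--     list = base7(price)
--     for i in range(len(list)):
--         list[i] = base_list[i]-1 if base_list[i] != 0 else 0
--
--     kurang = 0
--     for i in range(len(base_list)):
--         kurang += 7**i*list[i]
--     return kurang
--
-- def kembalian(price):
--     base_list = base7(price)
--     index_list_zero = []
--     for i in range(len(base_list)):
--         if base_list[i] == 0: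
--             index_list_zero.append(i)
--         else:
--             continue
--
--     add_value = 0
--     for i in index_list_zero:
--         add_value += 7**i
--
--     kembalian = add_value - kurang(price)
--     return kembalian
-- ===== SOURCE B (Python) =====
-- def kembalian(price):
--     if price <= 0:
--         return 0
--     d = 0
--     p = price
--     while p > 0:
--         d += 1
--         p //= 7
--     return (7 ** d - 1) // 6 - price
-- ===== Notes on version B (the rewrite author's own statement) =====
-- stated objective: simpler
-- what changed: Replaces the three digit-array passes (collect zero-digit indices, decrement nonzero digits, two weighted sums) with a single digit-count loop and a closed-form expression, using the identity that the result equals the repunit (base seven) of the digit count minus the price.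
import Mathlib
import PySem

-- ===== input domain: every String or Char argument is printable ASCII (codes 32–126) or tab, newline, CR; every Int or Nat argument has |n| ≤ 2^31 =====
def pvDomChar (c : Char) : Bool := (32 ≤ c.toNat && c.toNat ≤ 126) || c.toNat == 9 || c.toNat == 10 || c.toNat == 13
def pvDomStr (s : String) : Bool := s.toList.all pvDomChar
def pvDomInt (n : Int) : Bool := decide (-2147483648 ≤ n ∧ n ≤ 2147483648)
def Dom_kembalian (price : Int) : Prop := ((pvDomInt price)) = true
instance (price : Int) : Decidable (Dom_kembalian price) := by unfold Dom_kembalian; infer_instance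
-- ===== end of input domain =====

-- B replaces A's three digit-array passes by a digit-count loop plus the closed form (7^d - 1)//6 - price (simpler).

-- arithmetic fact the recursions terminate by (cited in decreasing_by)
lemma floordiv7_toNat_lt (p : Int) (h : 0 < p) : (PySem.Int.floordiv p 7).toNat < p.toNat := by
  have h1 : PySem.Int.floordiv p 7 < p := by
    rw [PySem.Int.floordiv_lt_iff_lt_mul (by norm_num)]
    nlinarith
  have h2 : (0:Int) ≤ PySem.Int.floordiv p 7 :=
    (PySem.Int.le_floordiv_iff_mul_le (by norm_num)).mpr (by omega)
  omega

-- ===== PORT A =====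
-- while price > 0: list.append(price % 7); price = price // 7
def base7 (price : Int) : List Int :=
  if h : 0 < price then
    PySem.Int.mod price 7 :: base7 (PySem.Int.floordiv price 7)
  else []
termination_by price.toNat
decreasing_by
  exact floordiv7_toNat_lt price h

-- list indexing list[i] inside 'for i in range(len(list))' is always in range, so getD is exact here
def kurang (price : Int) : Int :=
  let base_list := base7 price
  let list := base7 price
  let list := (List.range list.length).foldl
      (fun l i => l.set i (if base_list.getD i 0 ≠ 0 then base_list.getD i 0 - 1 else 0)) list
  (List.range base_list.length).foldl (fun k i => k + (7 : Int) ^ i * list.getD i 0) 0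

def kembalian (price : Int) : Int :=
  let base_list := base7 price
  let index_list_zero := (List.range base_list.length).foldl
      (fun acc i => if base_list.getD i 0 = 0 then acc ++ [i] else acc) ([] : List Nat)
  let add_value := index_list_zero.foldl (fun a i => a + (7 : Int) ^ i) 0
  add_value - kurang price

-- ===== PORT B =====
-- d = 0; while p > 0: d += 1; p //= 7
def countDigits (p : Int) : Nat :=
  if h : 0 < p then countDigits (PySem.Int.floordiv p 7) + 1 else 0
termination_by p.toNat
decreasing_by
  exact floordiv7_toNat_lt p h

def kembalian_alt (price : Int) : Int :=
  if price ≤ 0 then 0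
  else PySem.Int.floordiv ((7 : Int) ^ countDigits price - 1) 6 - price

-- ===== PRECONDITION & SPEC =====
def Spec_kembalian (price : Int) (out : Int) : Prop := out = kembalian_alt price
instance (price : Int) (out : Int) : Decidable (Spec_kembalian price out) := by unfold Spec_kembalian; infer_instance

-- ===== CLAIM (what is proved, stated in full; the proofs are below) =====
def Claim_equal_kembalian : Prop := ∀ (price : Int), Dom_kembalian price → Spec_kembalian price (kembalian price)

-- ===== LEMMAS AND PROOFS =====

-- value of a little-endian base-7 digit list
def val : List Int → Int
  | [] => 0
  | d :: t => d + 7 * val t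

-- geom n = 1 + 7 + … + 7^(n-1)
def geom : Nat → Int
  | 0 => 0
  | n + 1 => 1 + 7 * geom n

lemma geom_mul (n : Nat) : (7 : Int) ^ n - 1 = 6 * geom n := by
  induction n with
  | zero => simp [geom]
  | succ n ih => rw [pow_succ, geom]; ring_nf; ring_nf at ih; omega

lemma base7_aux (n : Nat) : ∀ p : Int, p.toNat ≤ n →
    val (base7 p) = max p 0 ∧ (base7 p).length = countDigits p := by
  induction n with
  | zero =>
    intro p hp
    have h0 : ¬ 0 < p := by omega
    rw [base7, countDigits]
    simp [h0, val]
    omega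
  | succ n ih =>
    intro p hp
    by_cases h : 0 < p
    · rw [base7, countDigits]
      simp only [h, dif_pos]
      have hlt : (PySem.Int.floordiv p 7).toNat ≤ n := by
        have := floordiv7_toNat_lt p h
        omega
      obtain ⟨hv, hl⟩ := ih _ hlt
      refine ⟨?_, ?_⟩
      · rw [val, hv]
        have h1 := PySem.Int.floordiv_mul_add_mod p 7
        have h2 : (0:Int) ≤ PySem.Int.floordiv p 7 :=
          (PySem.Int.le_floordiv_iff_mul_le (by norm_num)).mpr (by omega)
        omega
      · rw [List.length_cons, hl]
    · rw [base7, countDigits]; simp [h, val]; omega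

lemma val_base7 (p : Int) (hp : 0 ≤ p) : val (base7 p) = p := by
  have := (base7_aux p.toNat p le_rfl).1
  omega

lemma base7_nonpos (p : Int) (hp : p ≤ 0) : base7 p = [] := by
  rw [base7]; simp; omega

lemma len_base7 (p : Int) : (base7 p).length = countDigits p :=
  (base7_aux p.toNat p le_rfl).2

-- the set-loop writes f (bl.getD i 0) at every index i of range n, transforming the first n entries
lemma set_loop_aux (f : Int → Int) (bl : List Int) :
    ∀ n, n ≤ bl.length →
      (List.range n).foldl (fun l i => l.set i (f (bl.getD i 0))) bl
        = (bl.take n).map f ++ bl.drop n := by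
  intro n hn
  induction n with
  | zero => simp
  | succ n ih =>
    have hn' : n < bl.length := by omega
    rw [List.range_succ, List.foldl_append, ih (by omega)]
    have hlen : ((bl.take n).map f).length = n := by
      simp [List.length_take]; omega
    simp only [List.foldl_cons, List.foldl_nil]
    rw [List.set_append, hlen, if_neg (lt_irrefl n), Nat.sub_self,
      List.drop_eq_getElem_cons hn', List.getD_eq_getElem bl 0 hn', List.set_cons_zero]
    have hta : List.map f (List.take (n + 1) bl) = List.map f (List.take n bl) ++ [f bl[n]] := by
      rw [List.map_take, List.map_take, List.take_add_one, List.getElem?_map,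
        List.getElem?_eq_getElem hn']
      simp
    rw [hta]
    simp

lemma set_loop (f : Int → Int) (bl : List Int) :
    (List.range bl.length).foldl (fun l i => l.set i (f (bl.getD i 0))) bl = bl.map f := by
  rw [set_loop_aux f bl bl.length le_rfl]
  simp

-- shifting the index weight by one pulls out a factor 7
lemma sum_shift (l : List Nat) (g : Nat → Int) :
    (l.map (fun i => (7:Int) ^ (i + 1) * g i)).sum = 7 * (l.map (fun i => (7:Int) ^ i * g i)).sum := by
  rw [← List.sum_map_mul_left]
  apply congrArg
  apply List.map_congr_left
  intro i _
  ring

lemma sum_shift_pow (l : List Nat) :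
    (l.map (fun i => (7:Int) ^ (i + 1))).sum = 7 * (l.map (fun i => (7:Int) ^ i)).sum := by
  rw [← List.sum_map_mul_left]
  apply congrArg
  apply List.map_congr_left
  intro i _
  ring

-- central identity: Σ_{bl_i = 0} 7^i − Σ 7^i·(bl_i-1 if bl_i≠0 else 0) = geom |bl| − val bl
lemma sums (bl : List Int) :
    (((List.range bl.length).filter (fun i => decide (bl.getD i 0 = 0))).map (fun i => (7:Int) ^ i)).sum
      - ((List.range bl.length).map (fun i => (7:Int) ^ i *
          (if bl.getD i 0 ≠ 0 then bl.getD i 0 - 1 else 0))).sum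
    = geom bl.length - val bl := by
  induction bl with
  | nil => simp [geom, val]
  | cons d t ih =>
    have hcomp : ((fun i => decide ((d :: t).getD i 0 = 0)) ∘ (fun i : Nat => i + 1))
        = (fun i => decide (t.getD i 0 = 0)) := by
      funext i; simp [Function.comp]
    have hcomp2 : ((fun i => (7:Int) ^ i * (if (d :: t).getD i 0 ≠ 0 then (d :: t).getD i 0 - 1 else 0))
          ∘ (fun i : Nat => i + 1))
        = fun i => (7:Int) ^ (i + 1) * (if t.getD i 0 ≠ 0 then t.getD i 0 - 1 else 0) := by
      funext i; simp [Function.comp]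
    have hcomp3 : ∀ L : List Nat, List.map (fun i => (7:Int) ^ i) (List.map Nat.succ L)
        = List.map (fun i => (7:Int) ^ (i + 1)) L := by
      intro L; simp [List.map_map, Function.comp]
    rw [List.length_cons, List.range_succ_eq_map]
    simp only [List.filter_cons, List.getD_cons_zero, List.filter_map, List.map_cons,
      List.map_map, List.sum_cons, pow_zero, one_mul, hcomp, hcomp2]
    rw [sum_shift, geom, val]
    simp only [ne_eq] at ih ⊢
    by_cases hd : d = 0
    · rw [if_pos (show decide (d = 0) = true by simp [hd]), List.map_cons, List.sum_cons,
        hcomp3, sum_shift_pow, pow_zero, if_neg (by simp [hd])]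
      linarith [ih]
    · rw [if_neg (show ¬ decide (d = 0) = true by simp [hd]), hcomp3, sum_shift_pow,
        if_pos hd]
      linarith [ih]

-- closing the whole computation of A into geom/val form
lemma kembalian_closed (price : Int) :
    kembalian price = geom (base7 price).length - val (base7 price) := by
  simp only [kembalian, kurang]
  rw [set_loop (fun x => if x ≠ 0 then x - 1 else 0) (base7 price)]
  rw [PySem.List.foldl_append_ite_eq_filter (fun i => (base7 price).getD i 0 = 0)]
  rw [PySem.List.foldl_add, PySem.List.foldl_add]
  have hmap : (List.range (base7 price).length).map
        (fun i => (7:Int) ^ i * ((base7 price).map (fun x => if x ≠ 0 then x - 1 else 0)).getD i 0)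
      = (List.range (base7 price).length).map
        (fun i => (7:Int) ^ i * (if (base7 price).getD i 0 ≠ 0 then (base7 price).getD i 0 - 1 else 0)) := by
    apply List.map_congr_left
    intro i hi
    have hi' : i < (base7 price).length := List.mem_range.mp hi
    have hm : i < ((base7 price).map (fun x => if x ≠ 0 then x - 1 else 0)).length := by
      simpa using hi'
    rw [List.getD_eq_getElem _ 0 hm, List.getElem_map, List.getD_eq_getElem _ 0 hi']
  rw [hmap]
  have := sums (base7 price)
  simp only [List.nil_append, zero_add] at *
  linarith [this]

-- ===== VERDICT (by name: the statement is the Claim_ definition above) =====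
theorem kembalian_spec : Claim_equal_kembalian := by
  intro price _
  unfold Spec_kembalian kembalian_alt
  rw [kembalian_closed]
  by_cases h : price ≤ 0
  · rw [base7_nonpos price h, if_pos h]
    simp [geom, val]
  · rw [if_neg h, len_base7, val_base7 price (by omega)]
    rw [geom_mul, PySem.Int.floordiv_eq_ediv_of_pos (by norm_num),
      Int.mul_ediv_cancel_left _ (by norm_num)]
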